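-- pv_equiv track=rewrite | github.com/anthonycurtisadler/ARCADES | numbertools.py | is_roman
-- ===== SOURCE A (Python) =====
-- def is_roman (entrystring):
--
--     entrystring_copy = entrystring
--     for x in ['cm','cd','xc','xl','ix','iv','m','c','d','l','x','v','i']:
--         entrystring_copy = entrystring_copy.replace(x,'')
--     if entrystring_copy:
--         return False
--
--     for x in ['m','c','x','i']:
--         if entrystring.count(x)>5 or x*5 in entrystring:
--             return False
--     return True
-- ===== SOURCE B (Python) =====
-- def is_roman(entrystring):
--     # phase 1: the 13 replace-passes of the original empty the string exactly
--     # when every character is one of the 7 roman-digit letters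
--     if not all(ch in 'mcdlxvi' for ch in entrystring):
--         return False
--     # phase 2: repetition limits, unchanged
--     for x in 'mcxi':
--         if entrystring.count(x) > 5 or x * 5 in entrystring:
--             return False
--     return True
-- ===== Notes on version B (the rewrite author's own statement) =====
-- stated objective: simpler
-- what changed: Replaces the 13 sequential full-string replace passes (each rescanning and rebuilding the string) by a single character-membership pass over the input, since the replace cascade empties the string exactly when every character is one of the seven roman-digit letters; the repetition-limit phase is kept.
import Mathlib
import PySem

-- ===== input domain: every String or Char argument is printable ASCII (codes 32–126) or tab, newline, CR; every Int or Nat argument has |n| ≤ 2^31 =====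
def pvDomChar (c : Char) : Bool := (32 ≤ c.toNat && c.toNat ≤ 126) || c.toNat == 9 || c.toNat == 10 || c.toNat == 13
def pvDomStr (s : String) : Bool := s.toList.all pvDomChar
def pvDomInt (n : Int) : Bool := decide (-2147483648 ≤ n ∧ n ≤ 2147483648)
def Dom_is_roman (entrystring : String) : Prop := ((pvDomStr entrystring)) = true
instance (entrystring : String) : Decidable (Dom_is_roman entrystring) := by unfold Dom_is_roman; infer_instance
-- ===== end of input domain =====

-- B replaces A's 13 sequential replace-passes by one character-membership pass
-- over the input (the cascade empties the string exactly when every character is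
-- a roman-digit letter); objective: simpler.


-- ===== PORT A =====
-- x*5 for a Python string x (exact: string repetition)
def pyMul5 (x : String) : String := String.ofList (PySem.List.pyRepeat x.toList 5)

def is_roman (entrystring : String) : Bool :=
  -- entrystring_copy = entrystring; for x in [...]: entrystring_copy = entrystring_copy.replace(x,'')
  let entrystring_copy :=
    ["cm","cd","xc","xl","ix","iv","m","c","d","l","x","v","i"].foldl
      (fun acc x => PySem.Str.replace acc x "") entrystring
  -- 'if entrystring_copy: return False'  (string truthiness = nonempty)
  if entrystring_copy.toList ≠ [] then false
  else
    -- for x in ['m','c','x','i']: if entrystring.count(x) > 5 or x*5 in entrystring: return False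
    if ["m", "c", "x", "i"].any (fun x =>
        decide (5 < PySem.Str.count entrystring x) || PySem.Str.isIn (pyMul5 x) entrystring)
    then false else true

-- ===== PORT B =====
def is_roman_alt (entrystring : String) : Bool :=
  -- if not all(ch in 'mcdlxvi' for ch in entrystring): return False
  if !(entrystring.toList.all (fun ch => PySem.Chars.isIn [ch] "mcdlxvi".toList)) then false
  else
    -- for x in 'mcxi': if entrystring.count(x) > 5 or x*5 in entrystring: return False
    if "mcxi".toList.any (fun x =>
        decide (5 < PySem.Str.count entrystring (String.ofList [x])) ||
        PySem.Str.isIn (String.ofList (List.replicate 5 x)) entrystring)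
    then false else true

-- ===== PRECONDITION & SPEC =====
def Spec_is_roman (entrystring : String) (out : Bool) : Prop := out = is_roman_alt entrystring
instance (entrystring : String) (out : Bool) : Decidable (Spec_is_roman entrystring out) := by unfold Spec_is_roman; infer_instance

-- ===== CLAIM (what is proved, stated in full; the proofs are below) =====
def Claim_equal_is_roman : Prop := ∀ (entrystring : String), Dom_is_roman entrystring → Spec_is_roman entrystring (is_roman entrystring)

-- ===== LEMMAS AND PROOFS =====

-- membership in the result of replace.go with empty replacement only comes from acc or l
lemma go_mem {old : List Char} {c : Char} :
    ∀ (fuel : Nat) (l acc : List Char),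
      c ∈ PySem.Chars.replace.go old [] fuel l acc → c ∈ acc ∨ c ∈ l := by
  intro fuel
  induction fuel with
  | zero =>
    intro l acc h
    rw [PySem.Chars.replace.go] at h
    simpa using h
  | succ n ih =>
    intro l acc h
    cases l with
    | nil =>
      rw [PySem.Chars.replace.go] at h
      · simp at h
        exact Or.inl h
      · omega
    | cons a t =>
      rw [PySem.Chars.replace.go] at h
      by_cases hp : old.isPrefixOf (a :: t) = true
      · simp only [hp, if_pos, List.reverse_nil, List.nil_append] at h
        rcases ih _ _ h with h1 | h1
        · exact Or.inl h1
        · exact Or.inr (List.mem_of_mem_drop h1)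
      · simp only [hp, Bool.false_eq_true, if_neg, not_false_iff] at h
        rcases ih _ _ h with h1 | h1
        · rcases List.mem_cons.mp h1 with h2 | h2
          · exact Or.inr (by simp [h2])
          · exact Or.inl h2
        · exact Or.inr (List.mem_cons_of_mem _ h1)

-- for a character not occurring in the pattern, replace.go preserves membership exactly
lemma go_mem_iff {old : List Char} {c : Char} (hc : c ∉ old) :
    ∀ (fuel : Nat) (l acc : List Char),
      c ∈ PySem.Chars.replace.go old [] fuel l acc ↔ c ∈ acc ∨ c ∈ l := by
  intro fuel
  induction fuel with
  | zero =>
    intro l acc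
    rw [PySem.Chars.replace.go]
    simp
  | succ n ih =>
    intro l acc
    cases l with
    | nil =>
      rw [PySem.Chars.replace.go]
      · simp
      · omega
    | cons a t =>
      rw [PySem.Chars.replace.go]
      by_cases hp : old.isPrefixOf (a :: t) = true
      · simp only [hp, if_pos, List.reverse_nil, List.nil_append]
        obtain ⟨r, hr⟩ := List.isPrefixOf_iff_prefix.mp hp
        rw [ih]
        constructor
        · rintro (h1 | h1)
          · exact Or.inl h1
          · refine Or.inr ?_
            rw [← hr]
            exact List.mem_append_right _ (by rwa [← hr, List.drop_left] at h1)
        · rintro (h1 | h1)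
          · exact Or.inl h1
          · refine Or.inr ?_
            rw [← hr, List.drop_left]
            rw [← hr] at h1
            rcases List.mem_append.mp h1 with h2 | h2
            · exact absurd h2 hc
            · exact h2
      · simp only [hp, Bool.false_eq_true, if_neg, not_false_iff]
        rw [ih]
        constructor
        · rintro (h1 | h1)
          · rcases List.mem_cons.mp h1 with h2 | h2
            · exact Or.inr (by simp [h2])
            · exact Or.inl h2
          · exact Or.inr (List.mem_cons_of_mem _ h1)
        · rintro (h1 | h1)
          · exact Or.inl (List.mem_cons_of_mem _ h1)
          · rcases List.mem_cons.mp h1 with h2 | h2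
            · exact Or.inl (by simp [h2])
            · exact Or.inr h2

-- replacing a single character with '' is a filter
lemma go_single (a : Char) :
    ∀ (fuel : Nat) (l acc : List Char), l.length ≤ fuel →
      PySem.Chars.replace.go [a] [] fuel l acc = acc.reverse ++ l.filter (fun x => !(x == a)) := by
  intro fuel
  induction fuel with
  | zero =>
    intro l acc h
    have : l = [] := List.length_eq_zero_iff.mp (Nat.le_zero.mp h)
    subst this
    rw [PySem.Chars.replace.go]
    simp
  | succ n ih =>
    intro l acc h
    cases l with
    | nil =>
      rw [PySem.Chars.replace.go]
      · simp
      · omega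
    | cons b t =>
      rw [PySem.Chars.replace.go]
      simp only [List.length_cons, Nat.succ_le_succ_iff] at h
      by_cases hb : b = a
      · subst hb
        have hp : [b].isPrefixOf (b :: t) = true := by simp [List.isPrefixOf]
        simp only [hp, if_pos, List.reverse_nil, List.nil_append, List.length_cons,
          List.length_nil, List.drop_succ_cons, List.drop_zero]
        rw [ih t acc h]
        simp
      · have hp : ¬ ([a].isPrefixOf (b :: t) = true) := by
          simp [List.isPrefixOf]
          exact fun h' => absurd h'.symm hb
        rw [if_neg hp]
        rw [ih t (b :: acc) h]
        simp [hb]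

lemma replace_single (s : List Char) (a : Char) :
    PySem.Chars.replace s [a] [] = s.filter (fun x => !(x == a)) := by
  rw [PySem.Chars.replace]
  simp only [List.isEmpty_cons, Bool.false_eq_true, if_neg, not_false_iff]
  rw [go_single a s.length s [] le_rfl]
  simp

lemma replace_mem {s old : List Char} {c : Char} (ho : old ≠ [])
    (h : c ∈ PySem.Chars.replace s old []) : c ∈ s := by
  rw [PySem.Chars.replace] at h
  simp only [List.isEmpty_iff, ho, if_neg, not_false_iff] at h
  rcases go_mem _ _ _ h with h1 | h1
  · simp at h1
  · exact h1

lemma replace_mem_iff {s old : List Char} {c : Char} (ho : old ≠ []) (hc : c ∉ old) :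
    c ∈ PySem.Chars.replace s old [] ↔ c ∈ s := by
  rw [PySem.Chars.replace]
  simp only [List.isEmpty_iff, ho, if_neg, not_false_iff]
  rw [go_mem_iff hc]
  simp

-- the 13 replace passes empty the string iff every character is a roman-digit letter
lemma phase1_core (s : List Char) :
    PySem.Chars.replace (PySem.Chars.replace (PySem.Chars.replace (PySem.Chars.replace (PySem.Chars.replace (PySem.Chars.replace (PySem.Chars.replace (PySem.Chars.replace (PySem.Chars.replace (PySem.Chars.replace (PySem.Chars.replace (PySem.Chars.replace (PySem.Chars.replace s ['c','m'] []) ['c','d'] []) ['x','c'] []) ['x','l'] []) ['i','x'] []) ['i','v'] []) ['m'] []) ['c'] []) ['d'] []) ['l'] []) ['x'] []) ['v'] []) ['i'] [] = []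
    ↔ ∀ c ∈ s, c ∈ (['m','c','d','l','x','v','i'] : List Char) := by
  set t := PySem.Chars.replace (PySem.Chars.replace (PySem.Chars.replace (PySem.Chars.replace (PySem.Chars.replace (PySem.Chars.replace s ['c','m'] []) ['c','d'] []) ['x','c'] []) ['x','l'] []) ['i','x'] []) ['i','v'] [] with ht
  have tmem : ∀ c : Char, c ∈ t → c ∈ s := by
    intro c hc
    rw [ht] at hc
    exact replace_mem (by simp) (replace_mem (by simp) (replace_mem (by simp)
      (replace_mem (by simp) (replace_mem (by simp) (replace_mem (by simp) hc)))))
  have tmem2 : ∀ c : Char, c ∉ (['m','c','d','l','x','v','i'] : List Char) →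
      (c ∈ t ↔ c ∈ s) := by
    intro c hc
    simp only [List.mem_cons, List.not_mem_nil, or_false, not_or] at hc
    obtain ⟨h1, h2, h3, h4, h5, h6, h7⟩ := hc
    rw [ht]
    rw [replace_mem_iff (by simp) (by simp [h6, h7]),
        replace_mem_iff (by simp) (by simp [h7, h5]),
        replace_mem_iff (by simp) (by simp [h5, h4]),
        replace_mem_iff (by simp) (by simp [h5, h2]),
        replace_mem_iff (by simp) (by simp [h2, h3]),
        replace_mem_iff (by simp) (by simp [h2, h1])]
  rw [replace_single, replace_single, replace_single, replace_single, replace_single,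
      replace_single, replace_single]
  simp only [List.filter_filter, List.filter_eq_nil_iff]
  constructor
  · intro h c hcs
    by_contra hnot
    have hct : c ∈ t := (tmem2 c hnot).mpr hcs
    have := h c hct
    simp only [List.mem_cons, List.not_mem_nil, or_false, not_or] at hnot
    obtain ⟨h1, h2, h3, h4, h5, h6, h7⟩ := hnot
    simp [h1, h2, h3, h4, h5, h6, h7] at this
  · intro h c hct hpred
    have hcs := h c (tmem c hct)
    simp only [List.mem_cons, List.not_mem_nil, or_false] at hcs
    rcases hcs with h1 | h1 | h1 | h1 | h1 | h1 | h1 <;> simp [h1] at hpred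

-- ===== VERDICT (by name: the statement is the Claim_ definition above) =====
theorem is_roman_spec : Claim_equal_is_roman := by
  intro s _
  unfold Spec_is_roman is_roman is_roman_alt
  simp only [List.foldl, PySem.Str.toList_replace, String.reduceToList]
  have hA := phase1_core s.toList
  have hcond : (s.toList.all (fun ch => PySem.Chars.isIn [ch] (['m','c','d','l','x','v','i'] : List Char))) = true
      ↔ ∀ c ∈ s.toList, c ∈ (['m','c','d','l','x','v','i'] : List Char) := by
    rw [List.all_eq_true]
    constructor
    · intro h c hc
      exact (List.singleton_infix_iff _ _).mp ((PySem.Chars.isIn_iff_infix _ _).mp (h c hc))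
    · intro h c hc
      exact (PySem.Chars.isIn_iff_infix _ _).mpr ((List.singleton_infix_iff _ _).mpr (h c hc))
  by_cases hall : ∀ c ∈ s.toList, c ∈ (['m','c','d','l','x','v','i'] : List Char)
  · rw [hA.mpr hall, hcond.mpr hall]
    simp only [ne_eq, not_true_eq_false, Bool.false_eq_true,
      Bool.not_true, if_false]
    -- both take the phase-2 branch; the same four tests on both sides
    simp [pyMul5, PySem.Str.count_eq, PySem.Str.isIn_eq, PySem.List.pyRepeat_singleton,
      List.any, List.replicate]
  · have h1 := (not_iff_not.mpr hA).mpr hall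
    have h2 := (not_iff_not.mpr hcond).mpr hall
    simp only [Bool.not_eq_true] at h2
    rw [h2]
    simp [h1]
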